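-- pv_equiv track=rewrite | github.com/sophiaxiwa/Kniffel | kniffel_originalversion.py | isKniffel
-- ===== SOURCE A (Python) =====
-- def isKniffel(wuerfel):
--     count = 1
--     for i in range(len(wuerfel)-1):
--         zahl = wuerfel[i]
--         if wuerfel[i+1]==zahl:
--             count = count + 1
--         else:
--             count= 1
--         if count == 5:
--             return True
--
--     return False
-- ===== SOURCE B (Python) =====
-- def _run_lengths(xs):
--     # lengths of the maximal runs of consecutive equal values (run-length encoding)
--     if not xs:
--         return []
--     lens = []
--     prev = xs[0]
--     length = 1
--     for x in xs[1:]: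
--         if x == prev:
--             length += 1
--         else:
--             lens.append(length)
--             prev = x
--             length = 1
--     lens.append(length)
--     return lens
--
-- def isKniffel(wuerfel):
--     return any(l >= 5 for l in _run_lengths(wuerfel))
-- ===== Notes on version B (the rewrite author's own statement) =====
-- stated objective: alternative
-- what changed: B run-length-encodes the list into the lengths of its maximal runs and then asks any() whether some run reaches 5, instead of A's single counter with an in-loop early return at count==5.
import Mathlib
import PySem

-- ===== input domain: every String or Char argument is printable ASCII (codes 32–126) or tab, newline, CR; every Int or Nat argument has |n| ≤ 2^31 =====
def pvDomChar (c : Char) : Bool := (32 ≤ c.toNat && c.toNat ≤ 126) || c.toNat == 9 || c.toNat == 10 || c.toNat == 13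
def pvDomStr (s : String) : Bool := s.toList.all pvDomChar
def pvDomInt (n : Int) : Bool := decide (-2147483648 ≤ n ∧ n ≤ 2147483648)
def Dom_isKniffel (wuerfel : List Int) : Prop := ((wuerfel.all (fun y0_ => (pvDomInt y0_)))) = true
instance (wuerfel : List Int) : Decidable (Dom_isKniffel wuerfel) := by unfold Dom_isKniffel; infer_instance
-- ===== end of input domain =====

-- B replaces A's running counter with early return by a run-length encoding pass
-- followed by an any() over the run lengths (alternative decomposition, same cost).

-- ===== PORT A =====
-- A's loop over i with zahl = wuerfel[i], comparing wuerfel[i+1], carried as a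
-- recursion whose state is (zahl = previous element, count); early 'return True'
-- becomes the 'if count' == 5 then true' branch.
def isKniffelGo (zahl : Int) (count : Int) : List Int → Bool
  | [] => false
  | x :: xs =>
      let count' := if x == zahl then count + 1 else 1
      if count' == 5 then true else isKniffelGo x count' xs

def isKniffel (wuerfel : List Int) : Bool :=
  match wuerfel with
  | [] => false
  | x :: xs => isKniffelGo x 1 xs

-- ===== PORT B =====
-- _run_lengths: the for-loop over xs[1:] with state (prev, length, lens-accumulated-behind)
def rlGo (prev : Int) (len : Int) : List Int → List Int
  | [] => [len]
  | y :: ys => if y == prev then rlGo y (len + 1) ys else len :: rlGo y 1 ys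

def runLengths : List Int → List Int
  | [] => []
  | x :: xs => rlGo x 1 xs

def isKniffel_alt (wuerfel : List Int) : Bool :=
  (runLengths wuerfel).any (fun l => decide (5 ≤ l))

-- ===== PRECONDITION & SPEC =====
def Spec_isKniffel (wuerfel : List Int) (out : Bool) : Prop := out = isKniffel_alt wuerfel
instance (wuerfel : List Int) (out : Bool) : Decidable (Spec_isKniffel wuerfel out) := by unfold Spec_isKniffel; infer_instance

-- ===== CLAIM (what is proved, stated in full; the proofs are below) =====
def Claim_equal_isKniffel : Prop := ∀ (wuerfel : List Int), Dom_isKniffel wuerfel → Spec_isKniffel wuerfel (isKniffel wuerfel)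

-- ===== LEMMAS AND PROOFS =====

-- Once the current run already has length ≥ 5, B reports true.
theorem rlGo_any_of_ge (ys : List Int) (prev len : Int) (h : 5 ≤ len) :
    (rlGo prev len ys).any (fun l => decide (5 ≤ l)) = true := by
  induction ys generalizing prev len with
  | nil => simp [rlGo, h]
  | cons y ys ih =>
      simp only [rlGo]
      split
      · exact ih y (len + 1) (by omega)
      · simp [h]

-- Loop invariant: with 1 ≤ count ≤ 4, A's counter loop agrees with 'some run length ≥ 5'.
theorem go_eq_rl (xs : List Int) (zahl c : Int) (h1 : 1 ≤ c) (h4 : c ≤ 4) :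
    isKniffelGo zahl c xs = (rlGo zahl c xs).any (fun l => decide (5 ≤ l)) := by
  induction xs generalizing zahl c with
  | nil =>
      simp only [isKniffelGo, rlGo, List.any_cons, List.any_nil, Bool.or_false]
      simp
      omega
  | cons x xs ih =>
      simp only [isKniffelGo, rlGo]
      by_cases hx : x = zahl
      · simp only [hx, beq_self_eq_true, if_true]
        by_cases h5 : c + 1 = 5
        · simp only [h5]
          simp [rlGo_any_of_ge xs zahl 5 (by omega)]
        · have : (c + 1 == 5) = false := by simp [h5]
          simp only [this, Bool.false_eq_true, if_false]
          exact ih zahl (c + 1) (by omega) (by omega)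
      · have hb : (x == zahl) = false := by simp [hx]
        simp only [hb, Bool.false_eq_true, if_false, List.any_cons]
        have hc : decide (5 ≤ c) = false := by simp; omega
        simp only [hc, Bool.false_or]
        have : ((1 : Int) == 5) = false := by decide
        simp only [this, Bool.false_eq_true, if_false]
        exact ih x 1 (by omega) (by omega)

-- ===== VERDICT (by name: the statement is the Claim_ definition above) =====
theorem isKniffel_spec : Claim_equal_isKniffel := by
  intro wuerfel _
  unfold Spec_isKniffel
  cases wuerfel with
  | nil => rfl
  | cons x xs =>
      simp only [isKniffel, isKniffel_alt, runLengths]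
      exact go_eq_rl xs x 1 (by omega) (by omega)
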